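-- pv_equiv track=rewrite | github.com/homebrew9/leetcode_solutions | algorithms/medium/count_covered_buildings.py | countCoveredBuildings_1
-- ===== SOURCE A (Python) =====
-- from typing import List
--
-- def countCoveredBuildings_1(n: int, buildings: List[List[int]]) -> int:
--     # Another method. No need to sort.
--     hsh_x = dict()
--     hsh_y = dict()
--     for x, y in buildings:
--         if x in hsh_x:
--             hsh_x[x] = [min(y, hsh_x[x][0]), max(y, hsh_x[x][1])]
--         else:
--             hsh_x[x] = [y, y]
--         if y in hsh_y:
--             hsh_y[y] = [min(x, hsh_y[y][0]), max(x, hsh_y[y][1])]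
--         else:
--             hsh_y[y] = [x, x]
--     res = 0
--     for x, y in buildings:
--         if x in hsh_x and y not in hsh_x[x] and y in hsh_y and x not in hsh_y[y]:
--             res += 1
--     return res
-- ===== SOURCE B (Python) =====
-- from typing import List
--
-- def countCoveredBuildings_1(n: int, buildings: List[List[int]]) -> int:
--     # A building is covered iff it lies strictly inside its column's y-range
--     # and strictly inside its row's x-range, checked by direct scans.
--     res = 0
--     for x, y in buildings:
--         ys = [b[1] for b in buildings if b[0] == x]
--         xs = [b[0] for b in buildings if b[1] == y]
--         if min(ys) < y < max(ys) and min(xs) < x < max(xs):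
--             res += 1
--     return res
-- ===== Notes on version B (the rewrite author's own statement) =====
-- stated objective: alternative
-- what changed: Replaced A's two-dict min/max preprocessing plus list-membership ('y not in [lo,hi]') test by a dict-free quadratic version that, for each building, scans the list directly for its column's y-values and row's x-values and tests strict inequalities min<v<max.
import Mathlib
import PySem

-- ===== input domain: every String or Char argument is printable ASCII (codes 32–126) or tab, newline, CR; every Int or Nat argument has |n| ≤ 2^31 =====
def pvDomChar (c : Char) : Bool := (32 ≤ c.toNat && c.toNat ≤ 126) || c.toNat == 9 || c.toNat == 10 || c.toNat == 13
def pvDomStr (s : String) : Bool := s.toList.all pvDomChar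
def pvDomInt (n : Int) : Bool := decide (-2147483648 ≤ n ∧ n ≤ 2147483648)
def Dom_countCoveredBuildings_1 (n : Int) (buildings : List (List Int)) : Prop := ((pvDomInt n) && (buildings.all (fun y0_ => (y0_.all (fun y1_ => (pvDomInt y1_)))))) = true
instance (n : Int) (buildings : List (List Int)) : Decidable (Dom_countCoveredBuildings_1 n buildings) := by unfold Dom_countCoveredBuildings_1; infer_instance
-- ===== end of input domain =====

-- B replaces A's two-dict min/max preprocessing with a dict-free per-building direct
-- scan using strict inequalities; alternative decomposition, not faster.

-- `b[0]` / `b[1]` of a row; exact on the length-2 rows Pre_ admits (both ports use them).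
def pvFst2 (b : List Int) : Int := b.headD 0
def pvSnd2 (b : List Int) : Int := (b.drop 1).headD 0

-- ===== PORT A =====
-- the body of A's first loop, for one dict: key k, other coordinate v
def pvStepA (d : PySem.Dict Int (List Int)) (k v : Int) : PySem.Dict Int (List Int) :=
  if d.contains k then
    -- hsh[k] is always a 2-list [lo, hi]; hsh[k][0] / hsh[k][1] read exactly
    let cur := d.getD k []
    d.insert k [min v (cur.headD 0), max v ((cur.drop 1).headD 0)]
  else
    d.insert k [v, v]

def countCoveredBuildings_1 (n : Int) (buildings : List (List Int)) : Int :=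
  let hs := buildings.foldl
    (fun (s : PySem.Dict Int (List Int) × PySem.Dict Int (List Int)) b =>
      (pvStepA s.1 (pvFst2 b) (pvSnd2 b), pvStepA s.2 (pvSnd2 b) (pvFst2 b)))
    (PySem.Dict.empty, PySem.Dict.empty)
  buildings.foldl
    (fun res b =>
      let x := pvFst2 b
      let y := pvSnd2 b
      if hs.1.contains x && !((hs.1.getD x []).contains y)
          && hs.2.contains y && !((hs.2.getD y []).contains x)
      then res + 1 else res) 0

-- ===== PORT B =====
def countCoveredBuildings_1_alt (n : Int) (buildings : List (List Int)) : Int :=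
  buildings.foldl
    (fun res b =>
      let x := pvFst2 b
      let y := pvSnd2 b
      let ys := (buildings.filter (fun c => pvFst2 c == x)).map pvSnd2
      let xs := (buildings.filter (fun c => pvSnd2 c == y)).map pvFst2
      -- min(ys) etc.: ys/xs are nonempty (they contain the current building), so getD is exact
      if (PySem.List.min? ys (fun v => v)).getD 0 < y ∧ y < (PySem.List.max? ys (fun v => v)).getD 0
          ∧ (PySem.List.min? xs (fun v => v)).getD 0 < x ∧ x < (PySem.List.max? xs (fun v => v)).getD 0
      then res + 1 else res) 0

-- ===== PRECONDITION & SPEC =====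
-- Pre_ excludes exactly the inputs where A raises: a row of length ≠ 2 makes
-- Python's 'for x, y in buildings' unpacking raise ValueError.
def Pre_countCoveredBuildings_1 (n : Int) (buildings : List (List Int)) : Prop :=
  ∀ b ∈ buildings, b.length = 2
instance (n : Int) (buildings : List (List Int)) : Decidable (Pre_countCoveredBuildings_1 n buildings) := by unfold Pre_countCoveredBuildings_1; infer_instance
def pvWitness_countCoveredBuildings_1 : Int × List (List Int) :=
  (5, [[1, 2], [2, 2], [3, 2], [2, 1], [2, 3]])

def Spec_countCoveredBuildings_1 (n : Int) (buildings : List (List Int)) (out : Int) : Prop := out = countCoveredBuildings_1_alt n buildings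
instance (n : Int) (buildings : List (List Int)) (out : Int) : Decidable (Spec_countCoveredBuildings_1 n buildings out) := by unfold Spec_countCoveredBuildings_1; infer_instance

-- ===== CLAIM (what is proved, stated in full; the proofs are below) =====
def Claim_equal_countCoveredBuildings_1 : Prop := ∀ (n : Int) (buildings : List (List Int)), Dom_countCoveredBuildings_1 n buildings → Pre_countCoveredBuildings_1 n buildings → Spec_countCoveredBuildings_1 n buildings (countCoveredBuildings_1 n buildings)

-- ===== LEMMAS AND PROOFS =====

-- abstract "running min/max range" of the values seen so far
def pvUpd (o : Option (Int × Int)) (v : Int) : Option (Int × Int) :=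
  some (match o with
        | none => (v, v)
        | some (a, b) => (min v a, max v b))

def pvRng (o : Option (Int × Int)) (L : List (Int × Int)) (k : Int) : Option (Int × Int) :=
  L.foldl (fun o p => if p.1 = k then pvUpd o p.2 else o) o

def pvEnc (o : Option (Int × Int)) : Option (List Int) :=
  o.map (fun p => [p.1, p.2])

theorem pvFoldA_get? (L : List (Int × Int)) (k : Int) :
    ∀ (d : PySem.Dict Int (List Int)) (o : Option (Int × Int)),
      d.get? k = pvEnc o →
      (L.foldl (fun d p => pvStepA d p.1 p.2) d).get? k = pvEnc (pvRng o L k) := by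
  induction L with
  | nil => intro d o h; simpa [pvRng] using h
  | cons p t ih =>
    intro d o h
    have h' : (pvStepA d p.1 p.2).get? k = pvEnc (if p.1 = k then pvUpd o p.2 else o) := by
      unfold pvStepA
      by_cases hk : p.1 = k
      · subst hk
        have hc : d.contains p.1 = (d.get? p.1).isSome :=
          PySem.Dict.contains_eq_isSome_get? d p.1
        cases o with
        | none =>
          simp only [h, pvEnc, Option.map_none, Option.isSome_none] at hc ⊢
          rw [hc]
          simp [PySem.Dict.get?_insert_self, pvUpd]
        | some ab =>
          obtain ⟨a, b⟩ := ab
          have hg : d.getD p.1 [] = [a, b] := by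
            rw [PySem.Dict.getD_eq_get?_getD, h]; rfl
          simp only [h, pvEnc, Option.map_some, Option.isSome_some] at hc ⊢
          rw [hc]
          simp [hg, PySem.Dict.get?_insert_self, pvUpd]
      · have hne : k ≠ p.1 := fun h2 => hk h2.symm
        by_cases hc : d.contains p.1 <;>
          simp [hc, PySem.Dict.get?_insert, hne, h, hk]
    have hr : pvRng o (p :: t) k = pvRng (if p.1 = k then pvUpd o p.2 else o) t k := rfl
    rw [List.foldl_cons, hr]
    exact ih _ _ h'

theorem pvRng_eq_foldl (L : List (Int × Int)) (k : Int) :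
    ∀ o, pvRng o L k = ((L.filter (fun p => p.1 == k)).map Prod.snd).foldl pvUpd o := by
  induction L with
  | nil => intro o; rfl
  | cons p t ih =>
    intro o
    have h1 : pvRng o (p :: t) k = pvRng (if p.1 = k then pvUpd o p.2 else o) t k := rfl
    rw [h1, ih]
    by_cases h : p.1 = k <;> simp [h]

theorem pvUpd_fold (ys : List Int) :
    ∀ a b, ys.foldl pvUpd (some (a, b)) = some (ys.foldl min a, ys.foldl max b) := by
  induction ys with
  | nil => intro a b; rfl
  | cons y t ih =>
    intro a b
    show t.foldl pvUpd (some (min y a, max y b)) = _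
    rw [ih]
    simp [List.foldl_cons, min_comm, max_comm]

theorem pvFoldAB (buildings : List (List Int)) :
    ∀ (d1 d2 : PySem.Dict Int (List Int)),
      buildings.foldl
        (fun s b => (pvStepA s.1 (pvFst2 b) (pvSnd2 b), pvStepA s.2 (pvSnd2 b) (pvFst2 b)))
        (d1, d2)
      = (buildings.foldl (fun d b => pvStepA d (pvFst2 b) (pvSnd2 b)) d1,
         buildings.foldl (fun d b => pvStepA d (pvSnd2 b) (pvFst2 b)) d2) := by
  induction buildings with
  | nil => intro d1 d2; rfl
  | cons c t ih => intro d1 d2; simpa using ih _ _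

-- the column (or, with projections swapped, row) characterisation shared by both ports
theorem pvCol (buildings : List (List Int)) (proj1 proj2 : List Int → Int)
    (b : List Int) (hb : b ∈ buildings) :
    ∃ mn mx,
      (buildings.foldl (fun d c => pvStepA d (proj1 c) (proj2 c)) PySem.Dict.empty).get? (proj1 b)
        = some [mn, mx]
      ∧ (PySem.List.min? ((buildings.filter (fun c => proj1 c == proj1 b)).map proj2) (fun v => v)).getD 0 = mn
      ∧ (PySem.List.max? ((buildings.filter (fun c => proj1 c == proj1 b)).map proj2) (fun v => v)).getD 0 = mx
      ∧ mn ≤ proj2 b ∧ proj2 b ≤ mx := by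
  classical
  set L : List (Int × Int) := buildings.map (fun c => (proj1 c, proj2 c)) with hL
  have hfold : buildings.foldl (fun d c => pvStepA d (proj1 c) (proj2 c)) PySem.Dict.empty
      = L.foldl (fun d p => pvStepA d p.1 p.2) PySem.Dict.empty := by
    rw [hL, List.foldl_map]
  have hget := pvFoldA_get? L (proj1 b) PySem.Dict.empty none (by simp [pvEnc])
  have hys : (L.filter (fun p => p.1 == proj1 b)).map Prod.snd
      = (buildings.filter (fun c => proj1 c == proj1 b)).map proj2 := by
    rw [hL, List.filter_map, List.map_map]; rfl
  have hrng : pvRng none L (proj1 b)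
      = ((buildings.filter (fun c => proj1 c == proj1 b)).map proj2).foldl pvUpd none := by
    rw [pvRng_eq_foldl, hys]
  set ys := (buildings.filter (fun c => proj1 c == proj1 b)).map proj2 with hysdef
  have hmem : proj2 b ∈ ys := by
    rw [hysdef]
    exact List.mem_map_of_mem (List.mem_filter.mpr ⟨hb, by simp⟩)
  cases hys0 : ys with
  | nil => rw [hys0] at hmem; cases hmem
  | cons h0 t =>
    refine ⟨t.foldl min h0, t.foldl max h0, ?_, ?_, ?_, ?_, ?_⟩
    · rw [hfold, hget, hrng, hys0]
      rw [show (h0 :: t).foldl pvUpd none = t.foldl pvUpd (some (h0, h0)) from rfl,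
        pvUpd_fold]
      rfl
    · rw [PySem.List.min?_id_cons]; rfl
    · rw [PySem.List.max?_id_cons]; rfl
    · have := PySem.List.min?_isMin (xs := ys) (key := fun v => v)
        (m := t.foldl min h0) (by rw [hys0]; exact PySem.List.min?_id_cons ..) _ hmem
      simpa using this
    · have := PySem.List.max?_isMax (xs := ys) (key := fun v => v)
        (m := t.foldl max h0) (by rw [hys0]; exact PySem.List.max?_id_cons ..) _ hmem
      simpa using this


-- ===== VERDICT (by name: the statement is the Claim_ definition above) =====
theorem countCoveredBuildings_1_spec : Claim_equal_countCoveredBuildings_1 := by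
  intro n buildings _ _
  show countCoveredBuildings_1 n buildings = countCoveredBuildings_1_alt n buildings
  simp only [countCoveredBuildings_1, countCoveredBuildings_1_alt, pvFoldAB]
  apply PySem.List.foldl_congr_mem
  intro res b hb
  obtain ⟨mn1, mx1, hg1, hmn1, hmx1, hlo1, hhi1⟩ := pvCol buildings pvFst2 pvSnd2 b hb
  obtain ⟨mn2, mx2, hg2, hmn2, hmx2, hlo2, hhi2⟩ := pvCol buildings pvSnd2 pvFst2 b hb
  have hc1 := PySem.Dict.contains_eq_isSome_get?
    (buildings.foldl (fun d c => pvStepA d (pvFst2 c) (pvSnd2 c)) PySem.Dict.empty) (pvFst2 b)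
  have hc2 := PySem.Dict.contains_eq_isSome_get?
    (buildings.foldl (fun d c => pvStepA d (pvSnd2 c) (pvFst2 c)) PySem.Dict.empty) (pvSnd2 b)
  rw [hg1] at hc1
  rw [hg2] at hc2
  have hd1 : (buildings.foldl (fun d c => pvStepA d (pvFst2 c) (pvSnd2 c)) PySem.Dict.empty).getD (pvFst2 b) []
      = [mn1, mx1] := by rw [PySem.Dict.getD_eq_get?_getD, hg1]; rfl
  have hd2 : (buildings.foldl (fun d c => pvStepA d (pvSnd2 c) (pvFst2 c)) PySem.Dict.empty).getD (pvSnd2 b) []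
      = [mn2, mx2] := by rw [PySem.Dict.getD_eq_get?_getD, hg2]; rfl
  simp only [hc1, hc2, hd1, hd2, hmn1, hmx1, hmn2, hmx2, Option.isSome_some, Bool.true_and, Bool.and_true]
  have hA : ((!([mn1, mx1].contains (pvSnd2 b)) && !([mn2, mx2].contains (pvFst2 b))) = true)
      = (mn1 < pvSnd2 b ∧ pvSnd2 b < mx1 ∧ mn2 < pvFst2 b ∧ pvFst2 b < mx2) := by
    apply propext
    simp only [Bool.and_eq_true, Bool.not_eq_true', List.contains_cons, List.contains_nil,
      Bool.or_false, Bool.or_eq_false_iff, beq_eq_false_iff_ne, ne_eq]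
    constructor
    · rintro ⟨⟨h1, h2⟩, ⟨h3, h4⟩⟩; omega
    · rintro ⟨h1, h2, h3, h4⟩
      exact ⟨⟨by omega, by omega⟩, by omega, by omega⟩
  by_cases hB : mn1 < pvSnd2 b ∧ pvSnd2 b < mx1 ∧ mn2 < pvFst2 b ∧ pvFst2 b < mx2
  · have hT : (! [mn1, mx1].contains (pvSnd2 b) && ! [mn2, mx2].contains (pvFst2 b)) = true := by
      rw [hA]; exact hB
    rw [if_pos hT, if_pos hB]
  · have hF : ¬ ((! [mn1, mx1].contains (pvSnd2 b) && ! [mn2, mx2].contains (pvFst2 b)) = true) := by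
      rw [hA]; exact hB
    rw [if_neg hF, if_neg hB]
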